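-- pv_equiv track=rewrite | github.com/ai-kmu/etc | algorithm/2020/0414/eunhwan.py | solution
-- ===== SOURCE A (Python) =====
-- def solution(food_times, k):
--     times = {}
--     for idx, time in enumerate(food_times):
--         if time in times:
--             times[time].append(idx)
--         else:
--             times[time] = [idx]
--
--     len_foods = len(food_times)
--     cycle = 0
--     for time in sorted(times):
--         """
--         [1, 2, 3]
--         K -= T[0] * len(3)
--         K -= (T[1] - T[0]) * len(2)
--         ...
--         오름차순 정렬을 하여 삭제해나간다.
--         """
--         if k - (len_foods * (time - cycle)) >= 0:
--             k -= len_foods * (time - cycle)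
--             len_foods -= len(times[time])
--             cycle += time - cycle
--         else:
--             k %= len_foods
--             for i in times:
--                 if i >= time:
--                     idx = times[i][0]
--                     break
--             # 원래 위치로다시 복구시키기
--             for i in range(idx, len(food_times)):
--                 if food_times[i] >= time:
--                     if k == 0:
--                         return i + 1
--                     else: k -= 1
--     return -1
-- ===== SOURCE B (Python) =====
-- def solution(food_times, k):
--     n = len(food_times)
--     if n == 0 or sum(food_times) <= k:
--         return -1
--
--     def g(t):
--         return sum(min(f, t) for f in food_times)
--
--     lo = min(min(food_times), k // n)
--     hi = max(food_times)
--     while hi - lo > 1: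
--         mid = (lo + hi) // 2
--         if g(mid) <= k:
--             lo = mid
--         else:
--             hi = mid
--     survivors = [i for i, f in enumerate(food_times) if f > lo]
--     return survivors[(k - g(lo)) % len(survivors)] + 1
-- ===== Notes on version B (the rewrite author's own statement) =====
-- stated objective: alternative
-- what changed: B does no sorting and no grouping at all: it binary-searches on the eaten level t for the largest t with sum(min(f,t)) <= k, then selects the ((k - cost(t)) mod m)-th index among foods with f > t in original order, replacing A's value->indices dict, loop over sorted distinct times and dict re-scan.
import Mathlib
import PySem

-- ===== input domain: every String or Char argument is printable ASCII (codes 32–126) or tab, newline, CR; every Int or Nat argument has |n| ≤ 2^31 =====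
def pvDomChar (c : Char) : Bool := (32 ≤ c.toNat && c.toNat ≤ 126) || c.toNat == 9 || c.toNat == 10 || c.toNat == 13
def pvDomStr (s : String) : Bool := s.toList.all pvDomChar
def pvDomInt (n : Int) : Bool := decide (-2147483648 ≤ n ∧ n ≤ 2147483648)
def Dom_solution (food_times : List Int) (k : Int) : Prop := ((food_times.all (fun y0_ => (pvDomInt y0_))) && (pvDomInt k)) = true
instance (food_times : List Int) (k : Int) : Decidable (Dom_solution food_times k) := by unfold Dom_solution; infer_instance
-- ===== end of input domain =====

-- B replaces A's value→indices dict, sorted-distinct-values loop and dict re-scan by a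
-- binary search on the eaten level t (largest t with Σ min(f,t) ≤ k): no sorting at all
-- (objective: alternative).

-- ===== PORT A =====
-- 'times = {}; for idx, time in enumerate(food_times): …'  (append ported as overwrite-with-extended-list)
def buildTimes (food_times : List Int) : PySem.Dict Int (List Int) :=
  (PySem.List.enumerate food_times 0).foldl
    (fun times p =>
      if times.contains p.2 then
        times.insert p.2 ((times.getD p.2 []) ++ [p.1])
      else
        times.insert p.2 [p.1])
    PySem.Dict.empty

-- 'for i in times: if i >= time: idx = times[i][0]; break'
def findFirstGE (keys : List Int) (time : Int) : Option Int :=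
  match keys with
  | [] => none
  | i :: rest => if i ≥ time then some i else findFirstGE rest time

-- 'for i in range(idx, len(food_times)): …'; returns (early-returned value?, k afterwards)
def scanA (food_times : List Int) (time : Int) : List Int → Int → Option Int × Int
  | [], kk => (none, kk)
  | i :: rest, kk =>
    if PySem.List.pyGetD food_times i 0 ≥ time then   -- food_times[i], i ∈ [0, n): exact
      if kk = 0 then (some (i + 1), kk) else scanA food_times time rest (kk - 1)
    else scanA food_times time rest kk

-- 'for time in sorted(times): …'
def solLoop (food_times : List Int) (times : PySem.Dict Int (List Int)) (n : Int) :
    List Int → Int → Int → Int → Int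
  | [], _, _, _ => -1
  | time :: rest, k, len_foods, cycle =>
    if k - (len_foods * (time - cycle)) ≥ 0 then
      solLoop food_times times n rest (k - len_foods * (time - cycle))
        (len_foods - PySem.List.len (times.getD time []))
        (cycle + (time - cycle))
    else
      let k2 := PySem.Int.mod k len_foods
      let idx : Int :=
        match findFirstGE times.keys time with
        | some w => PySem.List.pyGetD (times.getD w []) 0 0   -- times[w][0]; list nonempty: exact
        | none => n - 1   -- unreachable (time itself is a key): models Python's leftover idx
      match scanA food_times time (PySem.List.pyRange idx n 1) k2 with
      | (some r, _) => r
      | (none, k3) => solLoop food_times times n rest k3 len_foods cycle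

def solution (food_times : List Int) (k : Int) : Int :=
  let times := buildTimes food_times
  solLoop food_times times (PySem.List.len food_times)
    (PySem.List.sorted times.keys (fun t => t) false) k (PySem.List.len food_times) 0

-- ===== PORT B =====
-- 'def g(t): return sum(min(f, t) for f in food_times)'
def gB (food_times : List Int) (t : Int) : Int :=
  (food_times.map (fun f => min f t)).sum

-- 'while hi - lo > 1: mid = (lo + hi) // 2; …'
def bsearch (food_times : List Int) (k lo hi : Int) : Int :=
  if hi - lo > 1 then
    let mid := PySem.Int.floordiv (lo + hi) 2
    if gB food_times mid ≤ k then bsearch food_times k mid hi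
    else bsearch food_times k lo mid
  else lo
termination_by (hi - lo).toNat
decreasing_by
  all_goals
    simp only [PySem.Int.floordiv_eq_ediv_of_pos (by norm_num : (0:Int) < 2)]
    omega

def solution_alt (food_times : List Int) (k : Int) : Int :=
  let n := PySem.List.len food_times
  if n = 0 ∨ food_times.sum ≤ k then -1
  else
    -- min(food_times) / max(food_times): list nonempty here, so the Option is some — exact
    let lo0 := min ((PySem.List.min? food_times (fun x => x)).getD 0) (PySem.Int.floordiv k n)
    let hi0 := (PySem.List.max? food_times (fun x => x)).getD 0
    let lo := bsearch food_times k lo0 hi0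
    let survivors := ((PySem.List.enumerate food_times 0).filter (fun p => decide (lo < p.2))).map (fun p => p.1)
    PySem.List.pyGetD survivors (PySem.Int.mod (k - gB food_times lo) (PySem.List.len survivors)) 0 + 1

-- ===== PRECONDITION & SPEC =====
def Spec_solution (food_times : List Int) (k : Int) (out : Int) : Prop := out = solution_alt food_times k
instance (food_times : List Int) (k : Int) (out : Int) : Decidable (Spec_solution food_times k out) := by unfold Spec_solution; infer_instance

-- ===== CLAIM (what is proved, stated in full; the proofs are below) =====
def Claim_equal_solution : Prop := ∀ (food_times : List Int) (k : Int), Dom_solution food_times k → Spec_solution food_times k (solution food_times k)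

-- ===== LEMMAS AND PROOFS =====

-- proof-side abbreviations
def pvKey (xs : List Int) (i : Int) : Int := PySem.List.pyGetD xs i 0
def pvQ (xs : List Int) (v : Int) : List Int :=
  (PySem.List.pyRange 0 (xs.length : Int) 1).filter (fun i => decide (v ≤ pvKey xs i))
def pvIdxs (xs : List Int) (v : Int) : List Int :=
  ((PySem.List.enumerate xs 0).filter (fun p => p.2 == v)).map (·.1)
def pvFirst (xs : List Int) (v : Int) : Int := (pvIdxs xs v).headI
def pvGrp (xs : List Int) (v : Int) : List Int := List.replicate (xs.count v) v

-- the reference loop: one food per step over a value list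
def refLoop (k n : Int) : List Int → Int → Int → Int → Option (Int × Int × Int)
  | [], _, _, _ => none
  | t :: rest, j, spent, prev =>
    if spent + (n - j) * (t - prev) > k then some (t, spent, j)
    else refLoop k n rest (j + 1) (spent + (n - j) * (t - prev)) t

def refOut (xs : List Int) (k : Int) : Option (Int × Int × Int) → Int
  | none => -1
  | some (v, sp, jj) =>
    PySem.List.pyGetD (pvQ xs v) (PySem.Int.mod (k - sp) ((xs.length : Int) - jj)) 0 + 1

-- the facts the break state of refLoop determines
def BFacts (ys : List Int) (k v sp jj : Int) : Prop :=
  0 ≤ jj ∧ jj < (ys.length : Int) ∧ k < ys.sum ∧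
  ((ys.countP (fun x => decide (v ≤ x)) : Int) = (ys.length : Int) - jj) ∧
  ∀ t : Int, gB ys t ≤ k → k < gB ys (t + 1) →
    (∀ f ∈ ys, (t < f ↔ v ≤ f)) ∧
    PySem.Int.mod (k - gB ys t) ((ys.length : Int) - jj)
      = PySem.Int.mod (k - sp) ((ys.length : Int) - jj)

-- ---- pvIdxs / pvQ facts ----
lemma idxs_eq_filter (xs : List Int) (v : Int) :
    pvIdxs xs v = (PySem.List.pyRange 0 (xs.length : Int) 1).filter (fun i => pvKey xs i == v) := by
  unfold pvIdxs pvKey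
  rw [show PySem.List.enumerate xs 0 = PySem.List.enumerate xs from rfl,
    PySem.List.enumerate_eq_map_pyRange xs 0, List.filter_map, List.map_map, PySem.List.len_eq]
  simp [Function.comp_def]

lemma len_idxs (xs : List Int) (v : Int) : (pvIdxs xs v).length = xs.count v := by
  rw [idxs_eq_filter, ← List.countP_eq_length_filter]
  have h := PySem.List.map_pyGetD_pyRange_zero xs 0
  rw [PySem.List.len_eq] at h
  calc (PySem.List.pyRange 0 (xs.length : Int) 1).countP (fun i => pvKey xs i == v)
      = ((PySem.List.pyRange 0 (xs.length : Int) 1).map (fun j => PySem.List.pyGetD xs j 0)).countP (fun x => x == v) := by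
        rw [List.countP_map]; rfl
    _ = xs.count v := by rw [h]; rfl

lemma mem_idxs (xs : List Int) (v i : Int) :
    i ∈ pvIdxs xs v ↔ 0 ≤ i ∧ i < (xs.length : Int) ∧ pvKey xs i = v := by
  rw [idxs_eq_filter]
  simp [List.mem_filter, PySem.List.mem_pyRange_one, and_assoc]

lemma idxs_pairwise (xs : List Int) (v : Int) : (pvIdxs xs v).Pairwise (· < ·) := by
  rw [idxs_eq_filter]
  exact (PySem.List.pairwise_lt_pyRange_one 0 (xs.length : Int)).filter _

lemma idxs_ne_nil (xs : List Int) {v : Int} (hv : v ∈ xs) : pvIdxs xs v ≠ [] := by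
  intro h
  have hl := len_idxs xs v
  rw [h] at hl
  have := List.count_pos_iff.mpr hv
  simp at hl; omega

lemma first_mem (xs : List Int) {v : Int} (hv : v ∈ xs) :
    pvFirst xs v ∈ pvIdxs xs v ∧ ∀ i ∈ pvIdxs xs v, pvFirst xs v ≤ i := by
  obtain ⟨h, t, ht⟩ := List.exists_cons_of_ne_nil (idxs_ne_nil xs hv)
  have hpw := idxs_pairwise xs v
  rw [ht] at hpw
  rw [List.pairwise_cons] at hpw
  have hfirst : pvFirst xs v = h := by unfold pvFirst; rw [ht]; rfl
  rw [hfirst, ht]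
  refine ⟨List.mem_cons_self, ?_⟩
  intro i hi
  rcases List.mem_cons.mp hi with rfl | hi
  · exact le_refl _
  · exact le_of_lt (hpw.1 i hi)

lemma idxs_of_not_mem (xs : List Int) {v : Int} (hv : v ∉ xs) : pvIdxs xs v = [] := by
  have hl := len_idxs xs v
  rw [List.count_eq_zero_of_not_mem hv] at hl
  exact List.eq_nil_of_length_eq_zero hl

lemma mem_Q (xs : List Int) (v i : Int) :
    i ∈ pvQ xs v ↔ 0 ≤ i ∧ i < (xs.length : Int) ∧ v ≤ pvKey xs i := by
  unfold pvQ
  simp [List.mem_filter, PySem.List.mem_pyRange_one, and_assoc]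

lemma Q_pairwise (xs : List Int) (v : Int) : (pvQ xs v).Pairwise (· < ·) := by
  exact (PySem.List.pairwise_lt_pyRange_one 0 (xs.length : Int)).filter _

lemma len_Q (xs : List Int) (v : Int) :
    (pvQ xs v).length = xs.countP (fun x => decide (v ≤ x)) := by
  unfold pvQ
  rw [← List.countP_eq_length_filter]
  have h := PySem.List.map_pyGetD_pyRange_zero xs 0
  rw [PySem.List.len_eq] at h
  calc (PySem.List.pyRange 0 (xs.length : Int) 1).countP (fun i => decide (v ≤ pvKey xs i))
      = ((PySem.List.pyRange 0 (xs.length : Int) 1).map (fun j => PySem.List.pyGetD xs j 0)).countP (fun x => decide (v ≤ x)) := by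
        rw [List.countP_map]; rfl
    _ = _ := by rw [h]

-- ---- dict characterization ----
lemma idxs_append (xs : List Int) (x v : Int) :
    pvIdxs (xs ++ [x]) v = pvIdxs xs v ++ (if x = v then [(xs.length : Int)] else []) := by
  unfold pvIdxs
  rw [PySem.List.enumerate_append, List.filter_append, List.map_append]
  congr 1
  by_cases h : x = v
  · simp [PySem.List.enumerate, h]
  · simp [PySem.List.enumerate, h]

lemma dedup_append (xs : List Int) (x : Int) :
    PySem.List.dedup (xs ++ [x])
      = if x ∈ xs then PySem.List.dedup xs else PySem.List.dedup xs ++ [x] := by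
  rw [PySem.List.dedup_eq_ofList, PySem.List.dedup_eq_ofList, PySem.Set.ofList_eq_foldl,
    PySem.Set.ofList_eq_foldl, List.foldl_append]
  simp only [List.foldl]
  rw [← PySem.Set.ofList_eq_foldl]
  by_cases h : x ∈ xs
  · have : PySem.Set.contains (PySem.Set.ofList xs) x = true :=
      (PySem.Set.contains_iff _ _).mpr ((PySem.Set.mem_ofList xs x).mpr h)
    simp [PySem.Set.add, this, h]
  · have : PySem.Set.contains (PySem.Set.ofList xs) x = false := by
      rw [Bool.eq_false_iff]
      intro hc
      exact h ((PySem.Set.mem_ofList xs x).mp ((PySem.Set.contains_iff _ _).mp hc))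
    simp [PySem.Set.add, this, h]

lemma dict_items (xs : List Int) :
    (buildTimes xs).items = (PySem.List.dedup xs).map (fun v => (v, pvIdxs xs v)) := by
  induction xs using List.reverseRecOn with
  | nil => rfl
  | append_singleton xs x ih =>
    have hkeys : (buildTimes xs).keys = PySem.List.dedup xs := by
      simp [PySem.Dict.keys, ih, List.map_map, Function.comp_def]
    have hnodup : (buildTimes xs).keys.Nodup := by
      rw [hkeys]; exact PySem.List.nodup_dedup xs
    have hstep : buildTimes (xs ++ [x])
        = (fun (times : PySem.Dict Int (List Int)) (p : Int × Int) =>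
            if times.contains p.2 then times.insert p.2 ((times.getD p.2 []) ++ [p.1])
            else times.insert p.2 [p.1]) (buildTimes xs) (((xs.length : Int)), x) := by
      unfold buildTimes
      rw [PySem.List.enumerate_append, List.foldl_append]
      norm_num [PySem.List.enumerate]
    rw [hstep]
    simp only []
    have hcont : (buildTimes xs).contains x = decide (x ∈ xs) := by
      rw [PySem.Dict.contains_eq_decide_mem_keys, hkeys]
      simp [PySem.List.mem_dedup]
    by_cases hx : x ∈ xs
    · rw [hcont]
      simp only [hx, decide_true, if_true]
      have hmemit : (x, pvIdxs xs x) ∈ (buildTimes xs).items := by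
        rw [ih]
        exact List.mem_map_of_mem ((PySem.List.mem_dedup xs x).mpr hx)
      have hgetD := PySem.Dict.getD_of_mem_items (buildTimes xs) hmemit hnodup []
      rw [hgetD, PySem.Dict.items_insert_of_contains _ _ (by rw [hcont]; simp [hx]), ih,
        List.map_map, dedup_append, if_pos hx]
      apply List.map_congr_left
      intro v hv
      by_cases hvx : v = x
      · subst hvx
        simp [idxs_append, Function.comp_def]
      · have : (v == x) = false := by simp [hvx]
        simp [Function.comp_def, this, idxs_append, Ne.symm hvx, hvx]
    · rw [hcont]
      simp only [hx, decide_false, Bool.false_eq_true, if_false]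
      rw [PySem.Dict.items_insert_of_not_contains _ _ (by rw [hcont]; simp [hx]), ih,
        dedup_append, if_neg hx, List.map_append]
      congr 1
      · apply List.map_congr_left
        intro v hv
        have hvxs : v ∈ xs := (PySem.List.mem_dedup xs v).mp hv
        have hvx : x ≠ v := fun h => hx (h ▸ hvxs)
        simp [idxs_append, hvx]
      · simp [idxs_append, idxs_of_not_mem xs hx]

lemma dict_keys (xs : List Int) : (buildTimes xs).keys = PySem.List.dedup xs := by
  simp [PySem.Dict.keys, dict_items, List.map_map, Function.comp_def]

lemma dict_getD (xs : List Int) {v : Int} (hv : v ∈ xs) :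
    (buildTimes xs).getD v [] = pvIdxs xs v := by
  have hmemit : (v, pvIdxs xs v) ∈ (buildTimes xs).items := by
    rw [dict_items]
    exact List.mem_map_of_mem ((PySem.List.mem_dedup xs v).mpr hv)
  exact PySem.Dict.getD_of_mem_items (buildTimes xs) hmemit
    (by rw [dict_keys]; exact PySem.List.nodup_dedup xs) []

-- ---- counting ----
lemma countP_split (xs : List Int) (v : Int) :
    xs.countP (fun x => decide (x < v)) + xs.countP (fun x => decide (v ≤ x)) = xs.length := by
  induction xs with
  | nil => rfl
  | cons x t ih =>
    by_cases h : x < v <;>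
      simp [List.countP_cons, h, not_lt.mp, le_of_lt] <;> omega

lemma countP_le_split (xs : List Int) (v : Int) :
    xs.countP (fun x => decide (x ≤ v)) = xs.countP (fun x => decide (x < v)) + xs.count v := by
  induction xs with
  | nil => rfl
  | cons x t ih =>
    rcases lt_trichotomy x v with h | h | h <;>
      simp [List.countP_cons, List.count_cons, h, ne_of_lt, ne_of_gt, le_of_lt, not_le.mpr,
        le_of_eq, lt_irrefl] <;> omega

-- ---- sorted distinct values ----
lemma S_pairwise (xs : List Int) :
    (PySem.List.sorted (PySem.List.dedup xs) (fun t => t) false).Pairwise (· < ·) := by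
  rw [PySem.List.dedup_eq_ofList]
  exact PySem.List.sorted_ofList_pairwise_lt xs

lemma S_mem (xs : List Int) (v : Int) :
    v ∈ PySem.List.sorted (PySem.List.dedup xs) (fun t => t) false ↔ v ∈ xs := by
  rw [PySem.List.mem_sorted, PySem.List.mem_dedup]

lemma count_flatMap_grp (xs : List Int) :
    ∀ (D : List Int), D.Nodup → ∀ a, (D.flatMap (pvGrp xs)).count a = if a ∈ D then xs.count a else 0 := by
  intro D
  induction D with
  | nil => intro _ a; simp
  | cons v t ih =>
    intro hnd a
    rw [List.nodup_cons] at hnd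
    rw [List.flatMap_cons, List.count_append, ih hnd.2 a]
    unfold pvGrp
    rw [List.count_replicate]
    by_cases hav : a = v
    · subst hav
      simp [hnd.1]
    · simp [hav, Ne.symm hav]

lemma pairwise_flatMap_grp (xs : List Int) :
    ∀ (D : List Int), D.Pairwise (· < ·) → (D.flatMap (pvGrp xs)).Pairwise (· ≤ ·) := by
  intro D
  induction D with
  | nil => intro _; simp
  | cons v t ih =>
    intro hpw
    rw [List.pairwise_cons] at hpw
    rw [List.flatMap_cons]
    rw [List.pairwise_append]
    refine ⟨?_, ih hpw.2, ?_⟩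
    · exact List.pairwise_replicate.mpr (Or.inr (le_refl v))
    · intro a ha b hb
      rw [List.mem_flatMap] at hb
      obtain ⟨w, hw, hbw⟩ := hb
      rw [List.eq_of_mem_replicate ha, List.eq_of_mem_replicate hbw]
      exact le_of_lt (hpw.1 w hw)

lemma flat_decomp (xs : List Int) :
    (PySem.List.sorted (PySem.List.dedup xs) (fun t => t) false).flatMap (pvGrp xs)
      = PySem.List.sorted xs (fun t => t) false := by
  symm
  apply PySem.List.sorted_id_eq_of_perm_of_pairwise
  · rw [List.perm_iff_count]
    intro a
    have hnd : (PySem.List.sorted (PySem.List.dedup xs) (fun t => t) false).Nodup :=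
      (PySem.List.sorted_perm (PySem.List.dedup xs) (fun t => t) false).nodup_iff.mpr
        (PySem.List.nodup_dedup xs)
    rw [count_flatMap_grp xs _ hnd a]
    by_cases ha : a ∈ xs
    · rw [if_pos ((S_mem xs a).mpr ha)]
    · rw [if_neg (fun h => ha ((S_mem xs a).mp h)), List.count_eq_zero_of_not_mem ha]
  · exact pairwise_flatMap_grp xs _ (S_pairwise xs)

-- ---- refLoop on a group ----
lemma refLoop_zero (k n v spent : Int) (hs : spent ≤ k) :
    ∀ (m : Nat) (L : List Int) (j : Int),
      refLoop k n (List.replicate m v ++ L) j spent v = refLoop k n L (j + (m : Int)) spent v := by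
  intro m
  induction m with
  | zero => intro L j; simp
  | succ m ih =>
    intro L j
    rw [List.replicate_succ, List.cons_append]
    rw [show refLoop k n (v :: (List.replicate m v ++ L)) j spent v
        = if spent + (n - j) * (v - v) > k then some (v, spent, j)
          else refLoop k n (List.replicate m v ++ L) (j + 1) (spent + (n - j) * (v - v)) v from rfl]
    rw [if_neg (by simp; linarith)]
    simp only [sub_self, mul_zero, add_zero]
    rw [ih L (j + 1)]
    congr 1
    push_cast
    ring

lemma refLoop_group (k n v spent prev : Int) {c : Nat} (hc : 0 < c) (L : List Int) (j : Int) :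
    refLoop k n (List.replicate c v ++ L) j spent prev
      = if spent + (n - j) * (v - prev) > k then some (v, spent, j)
        else refLoop k n L (j + (c : Int)) (spent + (n - j) * (v - prev)) v := by
  obtain ⟨m, rfl⟩ : ∃ m, c = m + 1 := ⟨c - 1, by omega⟩
  rw [List.replicate_succ, List.cons_append]
  rw [show refLoop k n (v :: (List.replicate m v ++ L)) j spent prev
      = if spent + (n - j) * (v - prev) > k then some (v, spent, j)
        else refLoop k n (List.replicate m v ++ L) (j + 1) (spent + (n - j) * (v - prev)) v from rfl]
  by_cases h : spent + (n - j) * (v - prev) > k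
  · rw [if_pos h, if_pos h]
  · rw [if_neg h, if_neg h]
    rw [refLoop_zero k n v _ (by linarith) m L (j + 1)]
    congr 1
    push_cast
    ring

-- ---- first-occurrence order of the dict keys; the idx computation ----
lemma dedup_first_pairwise (xs : List Int) :
    (PySem.List.dedup xs).Pairwise (fun a b => pvFirst xs a < pvFirst xs b) := by
  induction xs using List.reverseRecOn with
  | nil => rw [show PySem.List.dedup ([] : List Int) = [] from rfl]; exact List.Pairwise.nil
  | append_singleton xs x ih =>
    have hkeep : ∀ a ∈ PySem.List.dedup xs, pvFirst (xs ++ [x]) a = pvFirst xs a := by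
      intro a ha
      unfold pvFirst
      rw [idxs_append]
      have hne := idxs_ne_nil xs ((PySem.List.mem_dedup xs a).mp ha)
      rcases hl : pvIdxs xs a with _ | ⟨h, t⟩
      · exact absurd hl hne
      · by_cases hxa : x = a <;> simp [hxa]
    rw [dedup_append]
    by_cases hx : x ∈ xs
    · rw [if_pos hx]
      exact ih.imp_of_mem (fun ha hb hr => by rw [hkeep _ ha, hkeep _ hb]; exact hr)
    · rw [if_neg hx]
      rw [List.pairwise_append]
      refine ⟨ih.imp_of_mem (fun ha hb hr => by rw [hkeep _ ha, hkeep _ hb]; exact hr),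
        List.pairwise_singleton _ _, ?_⟩
      intro a ha b hb
      rw [List.mem_singleton] at hb
      rw [hb, hkeep _ ha]
      have hfx : pvFirst (xs ++ [x]) x = (xs.length : Int) := by
        unfold pvFirst
        rw [idxs_append, idxs_of_not_mem xs hx]
        simp
      rw [hfx]
      have hmem := (first_mem xs ((PySem.List.mem_dedup xs a).mp ha)).1
      rw [mem_idxs] at hmem
      omega

lemma Q_min (xs : List Int) (v : Int) {i0 : Int} {Q' : List Int}
    (hQ : pvQ xs v = i0 :: Q') : ∀ y ∈ pvQ xs v, i0 ≤ y := by
  have hpw := Q_pairwise xs v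
  rw [hQ] at hpw ⊢
  rw [List.pairwise_cons] at hpw
  intro y hy
  rcases List.mem_cons.mp hy with rfl | hy
  · exact le_refl _
  · exact le_of_lt (hpw.1 y hy)

lemma i0_spec (xs : List Int) (v : Int) {i0 : Int} {Q' : List Int}
    (hQ : pvQ xs v = i0 :: Q') :
    pvKey xs i0 ∈ xs ∧ pvFirst xs (pvKey xs i0) = i0
      ∧ pvIdxs xs (pvKey xs i0) = i0 :: (pvIdxs xs (pvKey xs i0)).tail := by
  have hi0Q : i0 ∈ pvQ xs v := by rw [hQ]; exact List.mem_cons_self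
  rw [mem_Q] at hi0Q
  obtain ⟨h0, hn, hv⟩ := hi0Q
  have hkmem : pvKey xs i0 ∈ xs := by
    unfold pvKey
    lift i0 to Nat using h0 with m
    rw [PySem.List.pyGetD_natCast, List.getD_eq_getElem xs 0 (by exact_mod_cast hn)]
    exact List.getElem_mem _
  have hi0idxs : i0 ∈ pvIdxs xs (pvKey xs i0) := by
    rw [mem_idxs]; exact ⟨h0, hn, rfl⟩
  obtain ⟨hfmem, hfmin⟩ := first_mem xs hkmem
  have hfle : pvFirst xs (pvKey xs i0) ≤ i0 := hfmin i0 hi0idxs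
  have hfQ : pvFirst xs (pvKey xs i0) ∈ pvQ xs v := by
    rw [mem_idxs] at hfmem
    rw [mem_Q]
    exact ⟨hfmem.1, hfmem.2.1, by rw [hfmem.2.2]; exact hv⟩
  have hge := Q_min xs v hQ _ hfQ
  have hfeq : pvFirst xs (pvKey xs i0) = i0 := le_antisymm hfle hge
  refine ⟨hkmem, hfeq, ?_⟩
  rcases hl : pvIdxs xs (pvKey xs i0) with _ | ⟨h, t⟩
  · exact absurd hl (idxs_ne_nil xs hkmem)
  · have : pvFirst xs (pvKey xs i0) = h := by unfold pvFirst; rw [hl]; rfl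
    rw [← this, hfeq]
    rfl

lemma idx_lemma (xs : List Int) (v : Int) {i0 : Int} {Q' : List Int}
    (hQ : pvQ xs v = i0 :: Q') :
    ∀ (D : List Int), D.Pairwise (fun a b => pvFirst xs a < pvFirst xs b) →
      (∀ w ∈ D, w ∈ xs) → (∀ x ∈ xs, v ≤ x → x ∈ D) →
      findFirstGE D v = some (pvKey xs i0) := by
  obtain ⟨hkmem, hfeq, _⟩ := i0_spec xs v hQ
  have hi0Q : i0 ∈ pvQ xs v := by rw [hQ]; exact List.mem_cons_self
  rw [mem_Q] at hi0Q
  intro D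
  induction D with
  | nil =>
    intro _ _ hallq
    exact absurd (hallq _ hkmem hi0Q.2.2) (List.not_mem_nil)
  | cons w t ihD =>
    intro hpwD hsub hallq
    rw [List.pairwise_cons] at hpwD
    unfold findFirstGE
    by_cases hw : w ≥ v
    · rw [if_pos hw]
      have hwxs : w ∈ xs := hsub w List.mem_cons_self
      have hfw := first_mem xs hwxs
      have hfwQ : pvFirst xs w ∈ pvQ xs v := by
        have := hfw.1
        rw [mem_idxs] at this
        rw [mem_Q]
        exact ⟨this.1, this.2.1, by rw [this.2.2]; exact hw⟩
      have hle : i0 ≤ pvFirst xs w := Q_min xs v hQ _ hfwQ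
      have hkD : pvKey xs i0 ∈ w :: t := hallq _ hkmem hi0Q.2.2
      rcases List.mem_cons.mp hkD with heq | hmt
      · rw [heq]
      · have := hpwD.1 _ hmt
        rw [hfeq] at this
        omega
    · rw [if_neg hw]
      refine ihD hpwD.2 (fun y hy => hsub y (List.mem_cons_of_mem w hy)) ?_
      intro x hx hvx
      rcases List.mem_cons.mp (hallq x hx hvx) with rfl | hxt
      · omega
      · exact hxt

-- ---- the inner scan ----
lemma scanA_spec (xs : List Int) (v : Int) :
    ∀ (l : List Int) (kk : Int), 0 ≤ kk →
      kk < ((l.filter (fun i => decide (v ≤ pvKey xs i))).length : Int) →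
      (scanA xs v l kk).1 = some (PySem.List.pyGetD (l.filter (fun i => decide (v ≤ pvKey xs i))) kk 0 + 1) := by
  intro l
  induction l with
  | nil => intro kk h0 hlt; simp at hlt; omega
  | cons i t ih =>
    intro kk h0 hlt
    by_cases hq : v ≤ pvKey xs i
    · have hfil : (i :: t).filter (fun i => decide (v ≤ pvKey xs i))
          = i :: t.filter (fun i => decide (v ≤ pvKey xs i)) := by
        simp [List.filter_cons, hq]
      rw [hfil]
      by_cases hk0 : kk = 0
      · subst hk0
        show (if PySem.List.pyGetD xs i 0 ≥ v then
            (if (0 : Int) = 0 then (some (i + 1), (0 : Int)) else scanA xs v t (0 - 1))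
          else scanA xs v t 0).1 = _
        rw [if_pos (by exact hq), if_pos rfl]
        rw [PySem.List.pyGetD_zero]
        rfl
      · lift kk to Nat using h0 with m
        obtain ⟨m', rfl⟩ : ∃ m', m = m' + 1 := ⟨m - 1, by omega⟩
        show (if PySem.List.pyGetD xs i 0 ≥ v then
            (if ((m' + 1 : Nat) : Int) = 0 then (some (i + 1), ((m' + 1 : Nat) : Int))
             else scanA xs v t (((m' + 1 : Nat) : Int) - 1))
          else scanA xs v t ((m' + 1 : Nat) : Int)).1 = _
        rw [if_pos (by exact hq), if_neg (by push_cast; omega)]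
        have he : (((m' + 1 : Nat) : Int) - 1) = ((m' : Nat) : Int) := by push_cast; ring
        rw [he, ih _ (by positivity) (by rw [hfil] at hlt; simp at hlt ⊢; omega)]
        congr 1
        rw [PySem.List.pyGetD_natCast, PySem.List.pyGetD_natCast]
        rfl
    · have hfil : (i :: t).filter (fun i => decide (v ≤ pvKey xs i))
          = t.filter (fun i => decide (v ≤ pvKey xs i)) := by
        simp [List.filter_cons, hq]
      rw [hfil]
      show (if PySem.List.pyGetD xs i 0 ≥ v then
          (if kk = 0 then (some (i + 1), kk) else scanA xs v t (kk - 1))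
        else scanA xs v t kk).1 = _
      rw [if_neg (by exact hq)]
      exact ih kk h0 (by rw [hfil] at hlt; exact hlt)

-- ---- A's loop vs refLoop ----
lemma A_sim (xs : List Int) (k : Int) :
    ∀ (r : List Int) (j spent prev : Int),
      r.Pairwise (· < ·) →
      (∀ v ∈ r, v ∈ xs) →
      (∀ x ∈ xs, x ∈ r ∨ (∀ v ∈ r, x < v)) →
      (∀ v, r.head? = some v → j = (xs.countP (fun x => decide (x < v)) : Int)) →
      solLoop xs (buildTimes xs) (xs.length : Int) r (k - spent) ((xs.length : Int) - j) prev
        = refOut xs k (refLoop k (xs.length : Int) (r.flatMap (pvGrp xs)) j spent prev) := by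
  intro r
  induction r with
  | nil => intro j spent prev _ _ _ _; rfl
  | cons v rest ih =>
    intro j spent prev hpw hmem hcomp hj
    have hvxs : v ∈ xs := hmem v List.mem_cons_self
    have hpw' := List.pairwise_cons.mp hpw
    have hj' : j = (xs.countP (fun x => decide (x < v)) : Int) := hj v rfl
    have hcpos : 0 < xs.count v := List.count_pos_iff.mpr hvxs
    have hflat : (v :: rest).flatMap (pvGrp xs)
        = List.replicate (xs.count v) v ++ rest.flatMap (pvGrp xs) := by
      rw [List.flatMap_cons]; rfl
    rw [hflat, refLoop_group k (xs.length : Int) v spent prev hcpos]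
    have hlen : PySem.List.len ((buildTimes xs).getD v []) = (xs.count v : Int) := by
      rw [dict_getD xs hvxs, PySem.List.len_eq, len_idxs]
    have hsol : solLoop xs (buildTimes xs) (xs.length : Int) (v :: rest) (k - spent) ((xs.length : Int) - j) prev
        = if (k - spent) - (((xs.length : Int) - j) * (v - prev)) ≥ 0 then
            solLoop xs (buildTimes xs) (xs.length : Int) rest
              ((k - spent) - ((xs.length : Int) - j) * (v - prev))
              (((xs.length : Int) - j) - PySem.List.len ((buildTimes xs).getD v []))
              (prev + (v - prev))
          else
            (let k2 := PySem.Int.mod (k - spent) ((xs.length : Int) - j)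
             let idx : Int :=
               match findFirstGE (buildTimes xs).keys v with
               | some w => PySem.List.pyGetD ((buildTimes xs).getD w []) 0 0
               | none => (xs.length : Int) - 1
             match scanA xs v (PySem.List.pyRange idx (xs.length : Int) 1) k2 with
             | (some r, _) => r
             | (none, k3) => solLoop xs (buildTimes xs) (xs.length : Int) rest k3 ((xs.length : Int) - j) prev) := rfl
    rw [hsol]
    by_cases hacc : spent + ((xs.length : Int) - j) * (v - prev) > k
    · -- the group breaks: A enters the else branch, ref stops here
      rw [if_neg (by linarith), if_pos hacc]
      have hcount_ge : ((xs.length : Int) - j) = (xs.countP (fun x => decide (v ≤ x)) : Int) := by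
        have := countP_split xs v
        rw [hj']
        omega
      have hpos : 0 < (xs.length : Int) - j := by
        rw [hcount_ge]
        have : 0 < xs.countP (fun x => decide (v ≤ x)) :=
          List.countP_pos_iff.mpr ⟨v, hvxs, by simp⟩
        omega
      have hk2nn := PySem.Int.mod_nonneg (k - spent) hpos
      have hk2lt := PySem.Int.mod_lt (k - spent) hpos
      have hQlen : ((pvQ xs v).length : Int) = (xs.length : Int) - j := by
        rw [len_Q, hcount_ge]
      have hQne : pvQ xs v ≠ [] := by
        intro h
        rw [h] at hQlen
        simp at hQlen
        omega
      obtain ⟨i0, Q', hQ⟩ := List.exists_cons_of_ne_nil hQne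
      obtain ⟨hkmem, hfeq, hidxs⟩ := i0_spec xs v hQ
      have hfind := idx_lemma xs v hQ (PySem.List.dedup xs) (dedup_first_pairwise xs)
        (fun w hw => (PySem.List.mem_dedup xs w).mp hw)
        (fun x hx _ => (PySem.List.mem_dedup xs x).mpr hx)
      have hi0Q : i0 ∈ pvQ xs v := by rw [hQ]; exact List.mem_cons_self
      rw [mem_Q] at hi0Q
      rw [dict_keys]
      simp only [hfind]
      rw [dict_getD xs hkmem, hidxs, PySem.List.pyGetD_zero, List.getD_cons_zero]
      -- the scan over range(i0, n) sees exactly pvQ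
      have hsplit : PySem.List.pyRange 0 (xs.length : Int) 1
          = PySem.List.pyRange 0 i0 1 ++ PySem.List.pyRange i0 (xs.length : Int) 1 :=
        PySem.List.pyRange_one_append 0 i0 (xs.length : Int) hi0Q.1 (le_of_lt hi0Q.2.1)
      have hprefix : (PySem.List.pyRange 0 i0 1).filter (fun i => decide (v ≤ pvKey xs i)) = [] := by
        rw [List.filter_eq_nil_iff]
        intro x hx
        rw [PySem.List.mem_pyRange_one] at hx
        simp only [decide_eq_true_eq]
        intro hvx
        have hxQ : x ∈ pvQ xs v := by
          rw [mem_Q]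
          exact ⟨hx.1, lt_trans hx.2 hi0Q.2.1, hvx⟩
        have := Q_min xs v hQ x hxQ
        omega
      have hfil : (PySem.List.pyRange i0 (xs.length : Int) 1).filter (fun i => decide (v ≤ pvKey xs i))
          = pvQ xs v := by
        have : pvQ xs v = ((PySem.List.pyRange 0 i0 1).filter (fun i => decide (v ≤ pvKey xs i)))
            ++ ((PySem.List.pyRange i0 (xs.length : Int) 1).filter (fun i => decide (v ≤ pvKey xs i))) := by
          unfold pvQ
          rw [hsplit, List.filter_append]
        rw [this, hprefix, List.nil_append]
      have hscan := scanA_spec xs v (PySem.List.pyRange i0 (xs.length : Int) 1)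
        (PySem.Int.mod (k - spent) ((xs.length : Int) - j)) hk2nn
        (by rw [hfil, hQlen]; exact hk2lt)
      rcases hsc : scanA xs v (PySem.List.pyRange i0 (xs.length : Int) 1)
          (PySem.Int.mod (k - spent) ((xs.length : Int) - j)) with ⟨o, k3⟩
      rw [hsc] at hscan
      simp only at hscan
      rw [hscan, hfil]
      rfl
    · -- the whole group is eaten: both loops advance
      rw [if_pos (by linarith), if_neg hacc, hlen]
      have e1 : (k - spent) - ((xs.length : Int) - j) * (v - prev)
          = k - (spent + ((xs.length : Int) - j) * (v - prev)) := by ring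
      have e2 : (((xs.length : Int) - j) - (xs.count v : Int))
          = (xs.length : Int) - (j + (xs.count v : Int)) := by ring
      have e3 : prev + (v - prev) = v := by ring
      rw [e1, e2, e3]
      apply ih
      · exact hpw'.2
      · exact fun w hw => hmem w (List.mem_cons_of_mem v hw)
      · intro x hx
        rcases hcomp x hx with hxr | hxlt
        · rcases List.mem_cons.mp hxr with rfl | hxr
          · exact Or.inr (fun w hw => hpw'.1 w hw)
          · exact Or.inl hxr
        · exact Or.inr (fun w hw => hxlt w (List.mem_cons_of_mem v hw))
      · intro w hw
        have hwrest : w ∈ rest := by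
          rcases rest with _ | ⟨a, t⟩
          · cases hw
          · have : a = w := by simpa using hw
            rw [← this]
            exact List.mem_cons_self
        have hvw : v < w := hpw'.1 w hwrest
        have hgap : ∀ x ∈ xs, (decide (x < w)) = true ↔ (decide (x ≤ v)) = true := by
          intro x hx
          rcases hcomp x hx with hxr | hxlt
          · rcases List.mem_cons.mp hxr with rfl | hxr
            · simp [hvw]
            · have hwx : w ≤ x := by
                rcases rest with _ | ⟨a, t⟩
                · cases hxr
                · have ha : a = w := by simpa using hw
                  subst ha
                  rcases List.mem_cons.mp hxr with rfl | hxt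
                  · exact le_refl x
                  · exact le_of_lt ((List.pairwise_cons.mp hpw'.2).1 x hxt)
              have h1 : ¬ x < w := not_lt.mpr hwx
              have h2 : ¬ x ≤ v := not_le.mpr (lt_of_lt_of_le hvw hwx)
              simp [h1, h2]
          · have h1 : x < v := hxlt v List.mem_cons_self
            simp only [decide_eq_true_eq]
            constructor
            · intro _; exact le_of_lt h1
            · intro _; exact lt_trans h1 hvw
        rw [List.countP_congr hgap, countP_le_split, hj']
        push_cast
        ring

lemma head_count_zero (xs : List Int) {v : Int} {t : List Int}
    (h : PySem.List.sorted (PySem.List.dedup xs) (fun t => t) false = v :: t) :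
    (xs.countP (fun x => decide (x < v)) : Int) = 0 := by
  have hmin := PySem.List.key_head_sorted_le (PySem.List.dedup xs) (fun t => t) h
  have : xs.countP (fun x => decide (x < v)) = 0 := by
    rw [List.countP_eq_zero]
    intro x hx
    have hle : v ≤ x := hmin x ((PySem.List.mem_dedup xs x).mpr hx)
    simp only [decide_eq_true_eq]
    omega
  rw [this]
  rfl

-- ---- gB facts ----
lemma gB_mono (xs : List Int) {s t : Int} (h : s ≤ t) : gB xs s ≤ gB xs t := by
  unfold gB
  induction xs with
  | nil => simp
  | cons x l ih =>
    simp only [List.map_cons, List.sum_cons]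
    have : min x s ≤ min x t := min_le_min le_rfl h
    linarith

lemma gB_append (a b : List Int) (t : Int) : gB (a ++ b) t = gB a t + gB b t := by
  unfold gB
  rw [List.map_append, List.sum_append]

lemma gB_low (xs : List Int) {t : Int} (h : ∀ f ∈ xs, t ≤ f) :
    gB xs t = (xs.length : Int) * t := by
  unfold gB
  induction xs with
  | nil => simp
  | cons x l ih =>
    simp only [List.map_cons, List.sum_cons, List.length_cons]
    rw [min_eq_right (h x List.mem_cons_self), ih (fun f hf => h f (List.mem_cons_of_mem x hf))]
    push_cast
    ring

lemma gB_high (xs : List Int) {t : Int} (h : ∀ f ∈ xs, f ≤ t) : gB xs t = xs.sum := by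
  unfold gB
  induction xs with
  | nil => simp
  | cons x l ih =>
    simp only [List.map_cons, List.sum_cons]
    rw [min_eq_left (h x List.mem_cons_self), ih (fun f hf => h f (List.mem_cons_of_mem x hf))]

lemma gB_perm {xs ys : List Int} (h : xs.Perm ys) (t : Int) : gB xs t = gB ys t := by
  unfold gB
  exact (h.map _).sum_eq

lemma sum_ge_len_mul (xs : List Int) {v : Int} (h : ∀ f ∈ xs, v ≤ f) :
    (xs.length : Int) * v ≤ xs.sum := by
  induction xs with
  | nil => simp
  | cons x l ih =>
    simp only [List.sum_cons, List.length_cons]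
    have := ih (fun f hf => h f (List.mem_cons_of_mem x hf))
    have := h x List.mem_cons_self
    push_cast
    nlinarith [this]

lemma mod_sub_mul (a m c : Int) (hm : 0 < m) :
    PySem.Int.mod (a - m * c) m = PySem.Int.mod a m := by
  rw [PySem.Int.mod_eq_emod_of_pos hm, PySem.Int.mod_eq_emod_of_pos hm]
  have : a - m * c = a + m * (-c) := by ring
  rw [this, Int.add_mul_emod_self_left]

-- ---- characterization of refLoop's break state ----
lemma refLoop_char (k : Int) :
    ∀ (L' E : List Int) (prev : Int),
      (E ++ L').Pairwise (· ≤ ·) →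
      ((E = [] ∧ prev = 0) ∨
        (E ≠ [] ∧ (∀ e ∈ E, e ≤ prev) ∧ (∀ f ∈ L', prev ≤ f) ∧
          E.sum + ((L'.length : Int)) * prev ≤ k)) →
      (refLoop k ((E ++ L').length : Int) L' (E.length : Int)
          (E.sum + (L'.length : Int) * prev) prev = none
        → ((E ++ L').sum ≤ k ∨ E ++ L' = []))
      ∧ (∀ v sp jj, refLoop k ((E ++ L').length : Int) L' (E.length : Int)
          (E.sum + (L'.length : Int) * prev) prev = some (v, sp, jj)
        → BFacts (E ++ L') k v sp jj) := by
  intro L'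
  induction L' with
  | nil =>
    intro E prev hpw hinv
    constructor
    · intro _
      rcases hinv with ⟨hE, _⟩ | ⟨_, _, _, hsum⟩
      · right; rw [hE]; rfl
      · left
        simp only [List.length_nil, Nat.cast_zero, zero_mul, add_zero] at hsum
        simpa using hsum
    · intro v sp jj h
      exact absurd h (by simp [refLoop])
  | cons v rest ih =>
    intro E prev hpw hinv
    set nn : Int := ((E ++ v :: rest).length : Int) with hnn
    set jj0 : Int := (E.length : Int) with hjj0
    set m : Int := ((v :: rest).length : Int) with hm
    have hmv : m = (rest.length : Int) + 1 := by
      rw [hm, List.length_cons]; push_cast; ring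
    have hnj : nn - jj0 = m := by
      rw [hnn, hjj0, hm]; push_cast [List.length_append]; ring
    have hmpos : 0 < m := by rw [hmv]; positivity
    set spent : Int := E.sum + m * prev with hspent
    have hrest_ge : ∀ f ∈ rest, v ≤ f := by
      have := (List.pairwise_append.mp hpw).2.1
      exact (List.pairwise_cons.mp this).1
    have hEle : ∀ e ∈ E, e ≤ v := by
      intro e he
      exact (List.pairwise_append.mp hpw).2.2 e he v List.mem_cons_self
    have hstep : refLoop k nn (v :: rest) jj0 spent prev
        = if spent + (nn - jj0) * (v - prev) > k then some (v, spent, jj0)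
          else refLoop k nn rest (jj0 + 1) (spent + (nn - jj0) * (v - prev)) v := rfl
    have hEsum : spent + (nn - jj0) * (v - prev) = E.sum + m * v := by
      rw [hnj, hspent]; ring
    by_cases hbrk : spent + (nn - jj0) * (v - prev) > k
    · constructor
      · intro h
        rw [hstep, if_pos hbrk] at h
        exact absurd h (by simp)
      · intro v' sp' jj' h
        rw [hstep, if_pos hbrk] at h
        simp only [Option.some.injEq, Prod.mk.injEq] at h
        obtain ⟨rfl, rfl, rfl⟩ := h
        rw [hEsum] at hbrk
        have hElt : ∀ e ∈ E, e < v := by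
          rcases hinv with ⟨hE, _⟩ | ⟨hEne, hle, hLge, hsum⟩
          · intro e he; rw [hE] at he; exact absurd he (List.not_mem_nil)
          · -- spent ≤ k and k < E.sum + m*v give prev < v
            have hprevle : prev ≤ v := hLge v List.mem_cons_self
            have hprevlt : prev < v := by
              rcases lt_or_eq_of_le hprevle with h' | h'
              · exact h'
              · exfalso
                rw [hspent, h'] at hsum
                linarith
            intro e he
            exact lt_of_le_of_lt (hle e he) hprevlt
        have hcons_ge : ∀ f ∈ v :: rest, v ≤ f := by
          intro f hf
          rcases List.mem_cons.mp hf with rfl | hf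
          · exact le_refl f
          · exact hrest_ge f hf
        refine ⟨by rw [hjj0]; positivity, ?_, ?_, ?_, ?_⟩
        · rw [← hnn, ← hjj0] at *
          omega
        · -- k < sum
          have h1 : m * v ≤ (v :: rest).sum := sum_ge_len_mul _ hcons_ge
          rw [List.sum_append, List.sum_cons]
          rw [List.sum_cons, hmv] at h1
          rw [hmv] at hbrk
          omega
        · -- countP
          rw [List.countP_append]
          have hE0 : E.countP (fun x => decide (v ≤ x)) = 0 := by
            rw [List.countP_eq_zero]
            intro e he
            simp only [decide_eq_true_eq]
            exact not_le.mpr (hElt e he)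
          have hC : (v :: rest).countP (fun x => decide (v ≤ x)) = (v :: rest).length := by
            rw [List.countP_eq_length]
            intro f hf
            simp only [decide_eq_true_eq]
            exact hcons_ge f hf
          rw [hE0, hC, hjj0]
          push_cast [List.length_append]
          ring
        · -- per-threshold facts
          intro t hgt hgt1
          have hgv : gB (E ++ v :: rest) v = E.sum + m * v := by
            rw [gB_append, gB_high E hEle, gB_low (v :: rest) hcons_ge, ← hm]
          have htv : t < v := by
            by_contra hle
            rw [not_lt] at hle
            have := gB_mono (E ++ v :: rest) hle
            rw [hgv] at this
            omega
          have hEt : ∀ e ∈ E, e ≤ t := by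
            rcases hinv with ⟨hE, _⟩ | ⟨hEne, hle, hLge, hsum⟩
            · intro e he; rw [hE] at he; exact absurd he (List.not_mem_nil)
            · have hprevt : prev ≤ t := by
                by_contra hpt
                rw [not_le] at hpt
                have ht1p : t + 1 ≤ prev := by omega
                have hmono := gB_mono (E ++ v :: rest) ht1p
                have hgp : gB (E ++ v :: rest) prev = E.sum + m * prev := by
                  rw [gB_append, gB_high E hle,
                    gB_low (v :: rest) (fun f hf => hLge f hf), ← hm]
                rw [hgp] at hmono
                omega
              intro e he
              exact le_trans (hle e he) hprevt
          have hgBt : gB (E ++ v :: rest) t = E.sum + m * t := by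
            rw [gB_append, gB_high E hEt,
              gB_low (v :: rest) (fun f hf => le_of_lt (lt_of_lt_of_le htv (hcons_ge f hf))), ← hm]
          constructor
          · intro f hf
            rcases List.mem_append.mp hf with hfE | hfc
            · constructor
              · intro hlt
                exact absurd hlt (not_lt.mpr (hEt f hfE))
              · intro hge
                exact absurd hge (not_le.mpr (hElt f hfE))
            · constructor
              · intro _; exact hcons_ge f hfc
              · intro _; exact lt_of_lt_of_le htv (hcons_ge f hfc)
          · rw [hgBt, hnj]
            have : k - (E.sum + m * t) = (k - spent) - m * (t - prev) := by
              rw [hspent]; ring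
            rw [this, mod_sub_mul _ _ _ hmpos]
    · -- whole group eaten: step and recurse
      have hrec := ih (E ++ [v]) v
      have hlist : (E ++ [v]) ++ rest = E ++ v :: rest := by
        rw [List.append_assoc]; rfl
      have hlen1 : ((E ++ [v]).length : Int) = jj0 + 1 := by
        rw [hjj0, List.length_append, List.length_singleton]; push_cast; ring
      have hsum1 : (E ++ [v]).sum + ((rest.length : Int)) * v
          = spent + (nn - jj0) * (v - prev) := by
        rw [List.sum_append, List.sum_singleton, hEsum, hmv]; ring
      have hinv' : ((E ++ [v] = [] ∧ v = 0) ∨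
          (E ++ [v] ≠ [] ∧ (∀ e ∈ E ++ [v], e ≤ v) ∧ (∀ f ∈ rest, v ≤ f) ∧
            (E ++ [v]).sum + ((rest.length : Int)) * v ≤ k)) := by
        right
        refine ⟨by simp, ?_, hrest_ge, ?_⟩
        · intro e he
          rcases List.mem_append.mp he with heE | hev
          · exact hEle e heE
          · rw [List.mem_singleton.mp hev]
        · rw [hsum1]
          exact not_lt.mp hbrk
      have hpw' : ((E ++ [v]) ++ rest).Pairwise (· ≤ ·) := by
        rw [hlist]; exact hpw
      have := hrec hpw' hinv'
      rw [hlist, hlen1, hsum1] at this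
      rw [hstep, if_neg hbrk]
      exact this

-- ---- the binary search ----
lemma bsearch_spec (xs : List Int) (k : Int) :
    ∀ (d : Nat) (lo hi : Int), (hi - lo).toNat ≤ d →
      gB xs lo ≤ k → k < gB xs hi → lo < hi →
      gB xs (bsearch xs k lo hi) ≤ k ∧ k < gB xs (bsearch xs k lo hi + 1) := by
  intro d
  induction d with
  | zero => intro lo hi hd _ _ hlt; omega
  | succ d ihd =>
    intro lo hi hd hlo hhi hlt
    rw [bsearch]
    by_cases hgt : hi - lo > 1
    · rw [if_pos hgt]
      have hmid := PySem.Int.floordiv_eq_ediv_of_pos (a := lo + hi) (by norm_num : (0:Int) < 2)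
      have hb1 : lo < PySem.Int.floordiv (lo + hi) 2 := by rw [hmid]; omega
      have hb2 : PySem.Int.floordiv (lo + hi) 2 < hi := by rw [hmid]; omega
      by_cases hg : gB xs (PySem.Int.floordiv (lo + hi) 2) ≤ k
      · rw [if_pos hg]
        exact ihd _ _ (by omega) hg hhi hb2
      · rw [if_neg hg]
        exact ihd _ _ (by omega) hlo (not_le.mp hg) hb1
    · rw [if_neg hgt]
      have hhi1 : hi = lo + 1 := by omega
      rw [hhi1] at hhi
      exact ⟨hlo, hhi⟩

-- ===== VERDICT (by name: the statement is the Claim_ definition above) =====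
theorem solution_spec : Claim_equal_solution := by
  unfold Claim_equal_solution Spec_solution
  intro xs k _
  set ys := PySem.List.sorted xs (fun t => t) false with hys
  have hperm : ys.Perm xs := PySem.List.sorted_perm xs (fun t => t) false
  have hlenys : (ys.length : Int) = (xs.length : Int) := by
    rw [hperm.length_eq]
  -- A's value through the reference loop
  have hj0 : ∀ v, (PySem.List.sorted (PySem.List.dedup xs) (fun t => t) false).head? = some v →
      (0 : Int) = (xs.countP (fun x => decide (x < v)) : Int) := by
    intro v hv
    obtain ⟨t, ht⟩ := List.head?_eq_some_iff.mp hv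
    exact (head_count_zero xs ht).symm
  have hA : solution xs k
      = refOut xs k (refLoop k (xs.length : Int) ys 0 0 0) := by
    have h0 : solution xs k
        = solLoop xs (buildTimes xs) (PySem.List.len xs)
            (PySem.List.sorted (buildTimes xs).keys (fun t => t) false) k (PySem.List.len xs) 0 := rfl
    rw [h0, PySem.List.len_eq, dict_keys]
    have h := A_sim xs k (PySem.List.sorted (PySem.List.dedup xs) (fun t => t) false) 0 0 0
      (S_pairwise xs) (fun v hv => (S_mem xs v).mp hv)
      (fun x hx => Or.inl ((S_mem xs x).mpr hx)) hj0
    rw [show k - 0 = k from by ring, show (xs.length : Int) - 0 = (xs.length : Int) from by ring] at h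
    rw [h, flat_decomp]
  -- the characterization, applied with E = [], prev = 0
  have hchar := refLoop_char k ys [] 0
    (by
      have := PySem.List.sorted_pairwise xs (fun t => t)
      simpa using this)
    (Or.inl ⟨rfl, rfl⟩)
  simp only [List.nil_append, List.length_nil, Nat.cast_zero, List.sum_nil, mul_zero,
    add_zero] at hchar
  rw [hlenys] at hchar
  -- unfold B up to its guard
  have hB : solution_alt xs k
      = if (xs.length : Int) = 0 ∨ xs.sum ≤ k then -1
        else
          (let lo0 := min ((PySem.List.min? xs (fun x => x)).getD 0)
              (PySem.Int.floordiv k (xs.length : Int))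
           let hi0 := (PySem.List.max? xs (fun x => x)).getD 0
           let lo := bsearch xs k lo0 hi0
           let survivors := ((PySem.List.enumerate xs 0).filter (fun p => decide (lo < p.2))).map (fun p => p.1)
           PySem.List.pyGetD survivors (PySem.Int.mod (k - gB xs lo) (PySem.List.len survivors)) 0 + 1) := by
    unfold solution_alt
    rw [PySem.List.len_eq]
  rcases hloop : refLoop k (xs.length : Int) ys 0 0 0 with _ | ⟨v, sp, jj⟩
  · -- both -1
    have := hchar.1 hloop
    rw [hA, hloop, hB]
    have hguard : (xs.length : Int) = 0 ∨ xs.sum ≤ k := by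
      rcases this with h | h
      · right
        rw [← hperm.sum_eq]
        exact h
      · left
        rw [← hlenys, h]
        rfl
    rw [if_pos hguard]
    rfl
  · obtain ⟨hjj0, hjjlt, hksum, hcount, hper⟩ := hchar.2 v sp jj hloop
    rw [hlenys] at hjjlt hcount
    rw [hperm.countP_eq] at hcount
    rw [hperm.sum_eq] at hksum
    rw [hA, hloop, hB]
    have hn0 : ¬ ((xs.length : Int) = 0 ∨ xs.sum ≤ k) := by
      intro h
      rcases h with h | h
      · omega
      · omega
    rw [if_neg hn0]
    have hxs_ne : xs ≠ [] := by
      intro h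
      rw [h] at hjjlt
      simp at hjjlt
      omega
    obtain ⟨x0, xt, hx0⟩ := List.exists_cons_of_ne_nil hxs_ne
    have hnpos : 0 < (xs.length : Int) := by omega
    -- min / max values
    set mn : Int := (PySem.List.min? xs (fun x => x)).getD 0 with hmn
    set mx : Int := (PySem.List.max? xs (fun x => x)).getD 0 with hmx
    have hmn_min : ∀ y ∈ xs, mn ≤ y := by
      rw [hmn, hx0, PySem.List.min?_id_cons]
      intro y hy
      rw [← hx0] at hy
      have := PySem.List.min?_isMin (xs := xs) (key := fun x => x) (m := xt.foldl min x0)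
        (by rw [hx0]; exact PySem.List.min?_id_cons x0 xt) y hy
      simpa using this
    have hmx_max : ∀ y ∈ xs, y ≤ mx := by
      intro y hy
      rw [hmx]
      rcases hmax : PySem.List.max? xs (fun x => x) with _ | m
      · rw [PySem.List.max?_eq_none_iff] at hmax
        exact absurd hmax hxs_ne
      · have := PySem.List.max?_isMax hmax y hy
        simpa [hmax] using this
    set lo0 : Int := min mn (PySem.Int.floordiv k (xs.length : Int)) with hlo0
    -- initial bracket
    have hglo0 : gB xs lo0 ≤ k := by
      have hle : ∀ f ∈ xs, lo0 ≤ f := fun f hf =>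
        le_trans (min_le_left _ _) (hmn_min f hf)
      rw [gB_low xs hle]
      have hfd := PySem.Int.floordiv_mul_add_mod k (xs.length : Int)
      have hmn2 := PySem.Int.mod_nonneg k hnpos
      have h1 : lo0 ≤ PySem.Int.floordiv k (xs.length : Int) := min_le_right _ _
      nlinarith
    have hghi0 : k < gB xs mx := by
      rw [gB_high xs hmx_max]
      exact hksum
    have hlo0hi0 : lo0 < mx := by
      by_contra hle
      rw [not_lt] at hle
      have := gB_mono xs hle
      omega
    have hbs := bsearch_spec xs k ((mx - lo0).toNat) lo0 mx le_rfl hglo0 hghi0 hlo0hi0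
    set lo : Int := bsearch xs k lo0 mx with hlo
    -- transfer the per-threshold facts from ys to xs
    have hgys : ∀ t, gB ys t = gB xs t := fun t => gB_perm hperm t
    have hfacts := hper lo (by rw [hgys]; exact hbs.1) (by rw [hgys]; exact hbs.2)
    obtain ⟨hiff, hmod⟩ := hfacts
    -- survivors = pvQ xs v
    have hsurv : ((PySem.List.enumerate xs 0).filter (fun p => decide (lo < p.2))).map (fun p => p.1)
        = pvQ xs v := by
      unfold pvQ pvKey
      rw [show PySem.List.enumerate xs 0 = PySem.List.enumerate xs from rfl,
        PySem.List.enumerate_eq_map_pyRange xs 0, List.filter_map, List.map_map, PySem.List.len_eq]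
      have hpred : ∀ i ∈ PySem.List.pyRange 0 (xs.length : Int) 1,
          ((fun p : Int × Int => decide (lo < p.2)) ∘ fun j => (j, PySem.List.pyGetD xs j 0)) i
            = (fun i : Int => decide (v ≤ PySem.List.pyGetD xs i 0)) i := by
        intro i hi
        rw [PySem.List.mem_pyRange_one] at hi
        have hkmem : PySem.List.pyGetD xs i 0 ∈ xs := by
          obtain ⟨h0, hn⟩ := hi
          lift i to Nat using h0 with m
          rw [PySem.List.pyGetD_natCast, List.getD_eq_getElem xs 0 (by exact_mod_cast hn)]
          exact List.getElem_mem _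
        have hiff' := hiff (PySem.List.pyGetD xs i 0) (hperm.mem_iff.mpr hkmem)
        simp only [Function.comp_apply, decide_eq_decide]
        exact hiff'
      rw [List.filter_congr hpred]
      simp [Function.comp_def]
    simp only []
    rw [hsurv]
    -- lengths and mod agree
    have hlenQ : (PySem.List.len (pvQ xs v)) = (xs.length : Int) - jj := by
      rw [PySem.List.len_eq, len_Q]
      exact hcount
    rw [hlenQ]
    have hmod' : PySem.Int.mod (k - gB xs lo) ((xs.length : Int) - jj)
        = PySem.Int.mod (k - sp) ((xs.length : Int) - jj) := by
      rw [← hgys lo, ← hlenys]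
      exact hmod
    rw [hmod']
    rfl
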